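-- pv_equiv track=rewrite | github.com/luke396/assignment2-systems | scripts/analyze_memory_allocations.py | _categorize_blocks_forward
-- ===== SOURCE A (Python) =====
-- def _categorize_blocks_forward(line: int) -> tuple[str, str]:
--     """Categorize forward() calls in blocks.py by line number."""
--     # Line ranges for different components in blocks.py
--     ranges = [
--         (158, 170, "Act:FFN", "SwiGLU"),  # SwiGLU.forward
--         (199, 211, "Act:FFN", "SiLU"),  # SiLU.forward
--         (112, 128, "Act:Norm", "RMSNorm"),  # RMSNorm.forward
--         (82, 84, "Act:Embed", "Embedding"),  # Embedding.forward
--         (48, 50, "Act:Linear", "Linear"),  # Linear.forward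
--         (358, 409, "Act:Attn", "MHSA"),  # MultiheadSelfAttention.forward
--         (510, 531, "Act:Block", "TFBlock"),  # TransformerBlock.forward
--     ]
--     for start, end, category, op_name in ranges:
--         if start <= line <= end:
--             return (category, f"{op_name}:{line}")
--     return ("Act:Other", f"forward:{line}")
-- ===== SOURCE B (Python) =====
-- _RANGES = [
--     (158, 170, "Act:FFN", "SwiGLU"),
--     (199, 211, "Act:FFN", "SiLU"),
--     (112, 128, "Act:Norm", "RMSNorm"),
--     (82, 84, "Act:Embed", "Embedding"),
--     (48, 50, "Act:Linear", "Linear"),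
--     (358, 409, "Act:Attn", "MHSA"),
--     (510, 531, "Act:Block", "TFBlock"),
-- ]
--
-- # Expand the (disjoint) inclusive ranges once into a flat lookup table.
-- _TABLE = {}
-- for _s, _e, _cat, _op in _RANGES:
--     for _ln in range(_s, _e + 1):
--         _TABLE[_ln] = (_cat, _op)
--
--
-- def _categorize_blocks_forward(line: int) -> tuple[str, str]:
--     hit = _TABLE.get(line)
--     if hit is not None:
--         cat, op = hit
--         return (cat, f"{op}:{line}")
--     return ("Act:Other", f"forward:{line}")
-- ===== Notes on version B (the rewrite author's own statement) =====
-- stated objective: idiomatic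
-- what changed: Replaces the per-call scan over interval tuples with a module-level dict that expands every range once into a line->(category,op) table, so the function body is a single O(1) dict lookup.
import Mathlib
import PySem

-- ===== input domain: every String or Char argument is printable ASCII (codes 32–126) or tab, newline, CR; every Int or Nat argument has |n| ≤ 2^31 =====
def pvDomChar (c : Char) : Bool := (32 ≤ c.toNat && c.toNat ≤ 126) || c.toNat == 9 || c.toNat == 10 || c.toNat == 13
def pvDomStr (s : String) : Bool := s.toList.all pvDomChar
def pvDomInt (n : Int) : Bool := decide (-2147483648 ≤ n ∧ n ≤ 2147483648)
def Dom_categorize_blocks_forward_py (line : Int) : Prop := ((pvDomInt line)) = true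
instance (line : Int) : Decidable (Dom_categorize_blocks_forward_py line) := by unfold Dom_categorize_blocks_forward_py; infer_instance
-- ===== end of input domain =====

-- B replaces A's per-call scan over interval tuples with a dict built once by expanding the ranges; idiomatic table lookup, same values.


-- ===== PORT A =====
def pvRangesA : List (Int × Int × String × String) :=
  [(158, 170, "Act:FFN", "SwiGLU"),
   (199, 211, "Act:FFN", "SiLU"),
   (112, 128, "Act:Norm", "RMSNorm"),
   (82, 84, "Act:Embed", "Embedding"),
   (48, 50, "Act:Linear", "Linear"),
   (358, 409, "Act:Attn", "MHSA"),
   (510, 531, "Act:Block", "TFBlock")]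

-- the 'for … if … return' loop of A, as structural recursion over the ranges list
def pvScanA (line : Int) : List (Int × Int × String × String) → String × String
  | [] => ("Act:Other", "forward:" ++ PySem.Int.toStr line)
  | r :: rest =>
      if r.1 ≤ line ∧ line ≤ r.2.1 then (r.2.2.1, r.2.2.2 ++ ":" ++ PySem.Int.toStr line)
      else pvScanA line rest

def categorize_blocks_forward_py (line : Int) : String × String :=
  pvScanA line pvRangesA

-- ===== PORT B =====
def pvRangesB : List (Int × Int × String × String) :=
  [(158, 170, "Act:FFN", "SwiGLU"),
   (199, 211, "Act:FFN", "SiLU"),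
   (112, 128, "Act:Norm", "RMSNorm"),
   (82, 84, "Act:Embed", "Embedding"),
   (48, 50, "Act:Linear", "Linear"),
   (358, 409, "Act:Attn", "MHSA"),
   (510, 531, "Act:Block", "TFBlock")]

-- the module-level table-building loops: for each range, insert every line of range(s, e+1)
def pvTableB : PySem.Dict Int (String × String) :=
  pvRangesB.foldl
    (fun d r => (PySem.List.pyRange r.1 (r.2.1 + 1) 1).foldl
      (fun d ln => d.insert ln (r.2.2.1, r.2.2.2)) d)
    PySem.Dict.empty

def categorize_blocks_forward_py_alt (line : Int) : String × String :=
  match pvTableB.get? line with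
  | some v => (v.1, v.2 ++ ":" ++ PySem.Int.toStr line)
  | none => ("Act:Other", "forward:" ++ PySem.Int.toStr line)

-- ===== PRECONDITION & SPEC =====
def Spec_categorize_blocks_forward_py (line : Int) (out : String × String) : Prop := out = categorize_blocks_forward_py_alt line
instance (line : Int) (out : String × String) : Decidable (Spec_categorize_blocks_forward_py line out) := by unfold Spec_categorize_blocks_forward_py; infer_instance

-- ===== CLAIM (what is proved, stated in full; the proofs are below) =====
def Claim_equal_categorize_blocks_forward_py : Prop := ∀ (line : Int), Dom_categorize_blocks_forward_py line → Spec_categorize_blocks_forward_py line (categorize_blocks_forward_py line)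

-- ===== LEMMAS AND PROOFS =====

-- filling a whole range with value v: the lookup afterwards is an interval test
theorem pv_get?_fold_range_insert (a b : Int) (v : String × String)
    (d : PySem.Dict Int (String × String)) (line : Int) :
    ((PySem.List.pyRange a b 1).foldl (fun d ln => d.insert ln v) d).get? line =
      if a ≤ line ∧ line < b then some v else d.get? line := by
  by_cases hab : a < b
  · have hfuel : ((b - a).toNat) = ((b - (a + 1)).toNat) + 1 := by omega
    rw [PySem.List.pyRange_one_cons hab]
    simp only [List.foldl_cons]
    rw [pv_get?_fold_range_insert (a + 1) b v (d.insert a v) line]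
    rw [PySem.Dict.get?_insert]
    split_ifs with h1 h2 h2 <;> first | rfl | omega
  · rw [PySem.List.pyRange_one_eq_nil (by omega)]
    simp only [List.foldl_nil]
    rw [if_neg (by omega)]
termination_by (b - a).toNat
decreasing_by omega

-- ===== VERDICT (by name: the statement is the Claim_ definition above) =====
set_option maxHeartbeats 1000000 in
theorem categorize_blocks_forward_py_spec : Claim_equal_categorize_blocks_forward_py := by
  intro line _
  unfold Spec_categorize_blocks_forward_py categorize_blocks_forward_py categorize_blocks_forward_py_alt
  unfold pvTableB pvRangesB pvRangesA
  simp only [List.foldl_cons, List.foldl_nil]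
  rw [pv_get?_fold_range_insert, pv_get?_fold_range_insert, pv_get?_fold_range_insert,
      pv_get?_fold_range_insert, pv_get?_fold_range_insert, pv_get?_fold_range_insert,
      pv_get?_fold_range_insert]
  simp only [pvScanA, PySem.Dict.get?_empty]
  split_ifs <;> first | rfl | omega
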